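-- pv_equiv track=rewrite | github.com/aannhvo/CS61A | study.py | missing_digits
-- ===== SOURCE A (Python) =====
-- def missing_digits(n):
--     last = n % 10
--     rest = n // 10
--     if n < 10:
--         return n
--     elif last == rest % 10:
--         return missing_digits(rest)
--     elif last != ((rest) % 10 + 1):
--         return last - (rest) % 10 -1 + missing_digits(rest)
--     return missing_digits(rest)
-- ===== SOURCE B (Python) =====
-- def missing_digits(n):
--     if n < 10:
--         return n
--     ds = []
--     m = n
--     while m > 0:
--         ds.append(m % 10)
--         m //= 10
--     ds.reverse()
--     total = ds[0]
--     for a, b in zip(ds, ds[1:]):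
--         total += 0 if b == a else b - a - 1
--     return total
-- ===== Notes on version B (the rewrite author's own statement) =====
-- stated objective: alternative
-- what changed: Replaces the branchy %10//10 recursion by two passes: build the digit list once, then a single adjacent-pair scan (zip) that adds each gap to an accumulator seeded with the leading digit.
import Mathlib
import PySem

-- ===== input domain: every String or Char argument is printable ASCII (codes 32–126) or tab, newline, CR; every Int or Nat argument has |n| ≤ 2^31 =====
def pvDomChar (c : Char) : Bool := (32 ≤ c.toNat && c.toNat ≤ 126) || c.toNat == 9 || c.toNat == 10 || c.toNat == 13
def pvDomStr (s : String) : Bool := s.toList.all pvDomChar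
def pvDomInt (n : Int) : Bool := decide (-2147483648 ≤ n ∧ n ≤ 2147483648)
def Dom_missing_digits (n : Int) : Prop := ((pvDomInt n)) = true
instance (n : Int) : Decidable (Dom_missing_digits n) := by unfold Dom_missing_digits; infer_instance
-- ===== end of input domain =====

-- B replaces A's branchy %10 / //10 recursion by two passes: build the digit list once,
-- then one adjacent-pair scan seeded with the leading digit (alternative decomposition, same cost).


-- ===== PORT A =====
-- termination helper for both ports (cited in decreasing_by)
theorem pvFdiv10 (a : Int) : Int.fdiv a 10 = a / 10 := by
  rw [Int.fdiv_eq_ediv]; norm_num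

def missing_digits (n : Int) : Int :=
  let last := PySem.Int.mod n 10
  let rest := PySem.Int.floordiv n 10
  if n < 10 then n
  else if last = PySem.Int.mod rest 10 then missing_digits rest
  else if last ≠ PySem.Int.mod rest 10 + 1 then
    last - PySem.Int.mod rest 10 - 1 + missing_digits rest
  else missing_digits rest
termination_by n.toNat
decreasing_by
  all_goals simp only [PySem.Int.floordiv, pvFdiv10] at *
  all_goals omega

-- ===== PORT B =====
-- while m > 0: ds.append(m % 10); m //= 10
def pvDigits (m : Int) (ds : List Int) : List Int :=
  if m > 0 then pvDigits (PySem.Int.floordiv m 10) (ds ++ [PySem.Int.mod m 10]) else ds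
termination_by m.toNat
decreasing_by
  simp only [PySem.Int.floordiv, pvFdiv10] at *
  omega

def missing_digits_alt (n : Int) : Int :=
  if n < 10 then n
  else
    let ds := (pvDigits n []).reverse
    (List.zip ds ds.tail).foldl
      (fun total p => total + (if p.2 = p.1 then 0 else p.2 - p.1 - 1)) (ds.headD 0)

-- ===== PRECONDITION & SPEC =====
def Spec_missing_digits (n : Int) (out : Int) : Prop := out = missing_digits_alt n
instance (n : Int) (out : Int) : Decidable (Spec_missing_digits n out) := by unfold Spec_missing_digits; infer_instance

-- ===== CLAIM (what is proved, stated in full; the proofs are below) =====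
def Claim_equal_missing_digits : Prop := ∀ (n : Int), Dom_missing_digits n → Spec_missing_digits n (missing_digits n)

-- ===== LEMMAS AND PROOFS =====

theorem pvMod10 (a : Int) : PySem.Int.mod a 10 = a % 10 := by
  simp only [PySem.Int.mod]
  rw [Int.fmod_eq_emod]
  norm_num

theorem pvFloordiv10 (a : Int) : PySem.Int.floordiv a 10 = a / 10 := by
  simp only [PySem.Int.floordiv, pvFdiv10]

theorem pvDigits_acc (m : Int) (acc : List Int) :
    pvDigits m acc = acc ++ pvDigits m [] := by
  by_cases h : 0 < m
  · rw [pvDigits]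
    simp only [if_pos h]
    rw [pvDigits_acc (PySem.Int.floordiv m 10) (acc ++ [PySem.Int.mod m 10])]
    conv_rhs => rw [pvDigits]
    simp only [if_pos h, List.nil_append]
    rw [pvDigits_acc (PySem.Int.floordiv m 10) [PySem.Int.mod m 10]]
    simp
  · rw [pvDigits]
    simp only [if_neg h]
    conv_rhs => rw [pvDigits]
    simp [h]
termination_by m.toNat
decreasing_by all_goals (simp only [pvFloordiv10] at *; omega)

theorem pvDigits_pos (m : Int) (h : 0 < m) :
    pvDigits m [] = PySem.Int.mod m 10 :: pvDigits (PySem.Int.floordiv m 10) [] := by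
  rw [pvDigits]
  simp only [if_pos h, List.nil_append]
  exact pvDigits_acc _ _

-- the value of B's else-branch (proof-only helper)
def pvBval (m : Int) : Int :=
  (List.zip (pvDigits m []).reverse ((pvDigits m []).reverse).tail).foldl
    (fun total p => total + (if p.2 = p.1 then 0 else p.2 - p.1 - 1)) (((pvDigits m []).reverse).headD 0)

-- sum of the per-pair gaps along a :: l
def pvGsum : Int → List Int → Int
  | _, [] => 0
  | a, b :: t => (if b = a then 0 else b - a - 1) + pvGsum b t

theorem pvFoldl_gsum (l : List Int) (a init : Int) :
    (List.zip (a :: l) l).foldl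
      (fun total p => total + (if p.2 = p.1 then 0 else p.2 - p.1 - 1)) init
    = init + pvGsum a l := by
  induction l generalizing a init with
  | nil => simp [pvGsum]
  | cons b t ih =>
    simp only [List.zip_cons_cons, List.foldl_cons, pvGsum]
    rw [ih b]
    omega

theorem pvGsum_append (l : List Int) (a b : Int) :
    pvGsum a (l ++ [b]) = pvGsum a l + (if b = l.getLastD a then 0 else b - l.getLastD a - 1) := by
  induction l generalizing a with
  | nil => simp [pvGsum]
  | cons c t ih =>
    simp only [List.cons_append, pvGsum]
    rw [ih c, List.getLastD_cons]
    omega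

theorem pvMain (m : Int) (h : 1 ≤ m) : missing_digits m = pvBval m := by
  by_cases h10 : m < 10
  · rw [missing_digits]
    simp only [if_pos h10]
    have hd0 : PySem.Int.floordiv m 10 = 0 := by rw [pvFloordiv10]; omega
    have hd : pvDigits m [] = [PySem.Int.mod m 10] := by
      rw [pvDigits_pos m (by omega), hd0, pvDigits]
      norm_num
    have hm : PySem.Int.mod m 10 = m := by rw [pvMod10]; omega
    unfold pvBval
    rw [hd, hm]
    simp
  · -- m ≥ 10
    have hrest1 : 1 ≤ PySem.Int.floordiv m 10 := by rw [pvFloordiv10]; omega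
    have ih := pvMain (PySem.Int.floordiv m 10) hrest1
    have hsplit : pvDigits m [] = PySem.Int.mod m 10 :: pvDigits (PySem.Int.floordiv m 10) [] :=
      pvDigits_pos m (by omega)
    have hrd : pvDigits (PySem.Int.floordiv m 10) []
        = PySem.Int.mod (PySem.Int.floordiv m 10) 10 :: pvDigits (PySem.Int.floordiv (PySem.Int.floordiv m 10) 10) [] :=
      pvDigits_pos _ (by omega)
    rcases hL : (pvDigits (PySem.Int.floordiv m 10) []).reverse with _ | ⟨a, l⟩
    · exfalso
      have : pvDigits (PySem.Int.floordiv m 10) [] = [] := by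
        have := congrArg List.reverse hL
        simpa using this
      rw [hrd] at this; exact absurd this (List.cons_ne_nil _ _)
    · have hlast : l.getLastD a = PySem.Int.mod (PySem.Int.floordiv m 10) 10 := by
        have h1 : (pvDigits (PySem.Int.floordiv m 10) []).reverse.getLast? = some (PySem.Int.mod (PySem.Int.floordiv m 10) 10) := by
          rw [List.getLast?_reverse, hrd]; rfl
        rw [hL] at h1
        have h2 : (a :: l).getLastD a = PySem.Int.mod (PySem.Int.floordiv m 10) 10 := by
          rw [List.getLastD_eq_getLast?, h1]; rfl
        rw [List.getLastD_cons] at h2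
        exact h2
      have hrev : (pvDigits m []).reverse = (a :: l) ++ [PySem.Int.mod m 10] := by
        rw [hsplit, List.reverse_cons, hL]
      have hBm : pvBval m
          = a + pvGsum a (l ++ [PySem.Int.mod m 10]) := by
        unfold pvBval
        rw [hrev, List.cons_append]
        simp only [List.tail_cons, List.headD_cons]
        exact pvFoldl_gsum _ a a
      have hBrest : pvBval (PySem.Int.floordiv m 10) = a + pvGsum a l := by
        unfold pvBval
        rw [hL]
        simp only [List.tail_cons, List.headD_cons]
        exact pvFoldl_gsum _ a a
      have hgap : pvBval m = pvBval (PySem.Int.floordiv m 10)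
          + (if PySem.Int.mod m 10 = PySem.Int.mod (PySem.Int.floordiv m 10) 10 then 0
             else PySem.Int.mod m 10 - PySem.Int.mod (PySem.Int.floordiv m 10) 10 - 1) := by
        rw [hBm, hBrest, pvGsum_append, hlast]
        omega
      rw [missing_digits]
      simp only [if_neg h10]
      rw [ih, hgap]
      split_ifs with e1 e2 <;> omega
termination_by m.toNat
decreasing_by simp only [pvFloordiv10] at *; omega

-- ===== VERDICT =====
theorem missing_digits_spec : Claim_equal_missing_digits := by
  intro n _
  unfold Spec_missing_digits missing_digits_alt
  by_cases h : n < 10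
  · rw [missing_digits]; simp [h]
  · simp only [if_neg h]
    exact pvMain n (by omega)
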